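-- pv_equiv track=rewrite | github.com/twardoch/midjargon | src/midjargon/core/permutations.py | split_options
-- ===== SOURCE A (Python) =====
-- ESCAPE_SEQUENCE_LENGTH = 2  # Length of escape sequence: backslash + character
--
-- def split_options(text: str) -> list[str]:
--     """
--     Split permutation options handling escaped commas and nested braces.
--
--     Args:
--         text: Text inside {} brackets containing comma-separated options.
--
--     Returns:
--         List of individual options with escaped characters unescaped.
--     """
--     options = []
--     current = []
--     i = 0
--     depth = 0  # Track nested braces
--
--     while i < len(text):
--         if text[i] == "\\" and i + 1 < len(text):
--             # Keep escaped characters as-is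
--             if text[i + 1] in (",", "{", "}"):
--                 current.append(text[i + 1])
--             else:
--                 current.extend([text[i], text[i + 1]])
--             i += ESCAPE_SEQUENCE_LENGTH
--         elif text[i] == "{":
--             depth += 1
--             current.append(text[i])
--             i += 1
--         elif text[i] == "}":
--             depth -= 1
--             current.append(text[i])
--             i += 1
--         elif text[i] == "," and depth == 0:
--             # Add current option after stripping whitespace
--             opt = "".join(current).strip()
--             if opt or not options:  # Include empty options
--                 options.append(opt)
--             current = []
--             i += 1
--         else:
--             current.append(text[i])
--             i += 1
--
--     # Add the last option after stripping whitespace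
--     if current or not options:
--         opt = "".join(current).strip()
--         options.append(opt)
--
--     return options
-- ===== SOURCE B (Python) =====
-- def _unescape(seg: str) -> str:
--     """Collapse \\, \\{ \\} to the bare char; keep the backslash otherwise."""
--     out = []
--     j = 0
--     n = len(seg)
--     while j < n:
--         if seg[j] == "\\" and j + 1 < n:
--             if seg[j + 1] in (",", "{", "}"):
--                 out.append(seg[j + 1])
--             else:
--                 out.append(seg[j])
--                 out.append(seg[j + 1])
--             j += 2
--         else:
--             out.append(seg[j])
--             j += 1
--     return "".join(out)
--
--
-- def split_options(text: str) -> list[str]: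
--     # Pass 1: split into raw segments at top-level unescaped commas
--     # (escape sequences are kept verbatim; depth tracks nested braces).
--     segments = []
--     buf = []
--     depth = 0
--     i = 0
--     n = len(text)
--     while i < n:
--         c = text[i]
--         if c == "\\" and i + 1 < n:
--             buf.append(c)
--             buf.append(text[i + 1])
--             i += 2
--         elif c == "{":
--             depth += 1
--             buf.append(c)
--             i += 1
--         elif c == "}":
--             depth -= 1
--             buf.append(c)
--             i += 1
--         elif c == "," and depth == 0:
--             segments.append("".join(buf))
--             buf = []
--             i += 1
--         else:
--             buf.append(c)
--             i += 1
--     last = "".join(buf)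
--     # Pass 2: unescape + strip each segment, applying the inclusion rule.
--     result = []
--     for seg in segments:
--         opt = _unescape(seg).strip()
--         if opt or not result:
--             result.append(opt)
--     if last or not result:
--         result.append(_unescape(last).strip())
--     return result
-- ===== Notes on version B (the rewrite author's own statement) =====
-- stated objective: alternative
-- what changed: A's single loop that simultaneously unescapes, tracks depth, strips and applies the inclusion rule is decomposed into three phases: a raw split at top-level unescaped commas, a separate unescape helper per segment, and a final inclusion pass.
import Mathlib
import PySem

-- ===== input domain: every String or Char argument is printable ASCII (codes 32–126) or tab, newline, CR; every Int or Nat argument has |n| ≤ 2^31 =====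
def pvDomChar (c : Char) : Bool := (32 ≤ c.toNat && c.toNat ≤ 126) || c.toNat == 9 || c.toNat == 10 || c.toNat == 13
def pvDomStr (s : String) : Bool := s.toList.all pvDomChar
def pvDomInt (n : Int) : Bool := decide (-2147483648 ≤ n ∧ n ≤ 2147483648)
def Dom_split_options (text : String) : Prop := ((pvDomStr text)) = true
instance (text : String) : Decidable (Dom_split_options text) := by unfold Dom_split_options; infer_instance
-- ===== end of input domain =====

-- B replaces A's all-in-one loop by a three-phase decomposition (raw split / unescape / inclusion); same cost, no speed claim.

-- ===== PORT A =====
-- A's while-loop: state (options, current, depth); escape first (needs a lookahead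
-- char), then '{' / '}' / top-level ',' / default, exactly in Python's branch order.
def split_options_loop : List Char → List String → List Char → Int → List String
  | '\\' :: c2 :: cs, options, current, depth =>
      if c2 = ',' ∨ c2 = '{' ∨ c2 = '}' then
        split_options_loop cs options (current ++ [c2]) depth
      else
        split_options_loop cs options (current ++ ['\\', c2]) depth
  | '{' :: cs, options, current, depth =>
      split_options_loop cs options (current ++ ['{']) (depth + 1)
  | '}' :: cs, options, current, depth =>
      split_options_loop cs options (current ++ ['}']) (depth - 1)
  | ',' :: cs, options, current, depth =>
      if depth = 0 then
        split_options_loop cs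
          (if String.ofList (PySem.Chars.strip current) ≠ "" ∨ options = [] then
            options ++ [String.ofList (PySem.Chars.strip current)] else options)
          [] depth
      else
        split_options_loop cs options (current ++ [',']) depth
  | c :: cs, options, current, depth =>
      split_options_loop cs options (current ++ [c]) depth
  | [], options, current, _ =>
      if current ≠ [] ∨ options = [] then
        options ++ [String.ofList (PySem.Chars.strip current)]
      else options

def split_options (text : String) : List String :=
  split_options_loop text.toList [] [] 0

-- ===== PORT B =====
-- Source B's _unescape helper.
def pvUnescape : List Char → List Char
  | '\\' :: c2 :: cs =>
      (if c2 = ',' ∨ c2 = '{' ∨ c2 = '}' then [c2] else ['\\', c2]) ++ pvUnescape cs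
  | c :: cs => c :: pvUnescape cs
  | [] => []

-- Source B's pass 1: split into raw segments at top-level unescaped commas.
def pvPass1 : List Char → List Char → Int → List (List Char)
  | '\\' :: c2 :: cs, buf, depth => pvPass1 cs (buf ++ ['\\', c2]) depth
  | '{' :: cs, buf, depth => pvPass1 cs (buf ++ ['{']) (depth + 1)
  | '}' :: cs, buf, depth => pvPass1 cs (buf ++ ['}']) (depth - 1)
  | ',' :: cs, buf, depth =>
      if depth = 0 then buf :: pvPass1 cs [] depth
      else pvPass1 cs (buf ++ [',']) depth
  | c :: cs, buf, depth => pvPass1 cs (buf ++ [c]) depth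
  | [], buf, _ => [buf]

-- Source B's pass 2: unescape + strip each segment, with the inclusion rule
-- (middle segments by stripped emptiness, the last by raw emptiness).
def pvAssemble : List (List Char) → List String → List String
  | [], result => result
  | [last], result =>
      if last ≠ [] ∨ result = [] then
        result ++ [String.ofList (PySem.Chars.strip (pvUnescape last))]
      else result
  | seg :: seg2 :: rest, result =>
      let opt := String.ofList (PySem.Chars.strip (pvUnescape seg))
      pvAssemble (seg2 :: rest) (if opt ≠ "" ∨ result = [] then result ++ [opt] else result)

def split_options_alt (text : String) : List String :=
  pvAssemble (pvPass1 text.toList [] 0) []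

-- ===== PRECONDITION & SPEC =====
def Spec_split_options (text : String) (out : List String) : Prop := out = split_options_alt text
instance (text : String) (out : List String) : Decidable (Spec_split_options text out) := by unfold Spec_split_options; infer_instance

-- ===== CLAIM (what is proved, stated in full; the proofs are below) =====
def Claim_equal_split_options : Prop := ∀ (text : String), Dom_split_options text → Spec_split_options text (split_options text)

-- ===== LEMMAS AND PROOFS =====

-- A buffer is "closed" when it is a concatenation of complete units
-- (escape pairs or single non-backslash chars); pvPass1's buffer always is,
-- except for a lone trailing backslash added at the very end.
inductive pvClosed : List Char → Prop
  | nil : pvClosed []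
  | esc (b : List Char) (c : Char) : pvClosed b → pvClosed (b ++ ['\\', c])
  | chr (b : List Char) (c : Char) : pvClosed b → c ≠ '\\' → pvClosed (b ++ [c])

theorem pvUnescape_cons_ne (c : Char) (t : List Char) (hc : c ≠ '\\') :
    pvUnescape (c :: t) = c :: pvUnescape t := by
  cases t <;> simp [pvUnescape, hc]

theorem pvUnescape_esc (c2 : Char) (t : List Char) :
    pvUnescape ('\\' :: c2 :: t) =
      (if c2 = ',' ∨ c2 = '{' ∨ c2 = '}' then [c2] else ['\\', c2]) ++ pvUnescape t := by
  simp [pvUnescape]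

theorem pvUnescape_append_closed (b : List Char) (hb : pvClosed b) :
    ∀ t, pvUnescape (b ++ t) = pvUnescape b ++ pvUnescape t := by
  induction hb with
  | nil => intro t; simp [pvUnescape]
  | esc b c _ ih =>
      intro t
      rw [List.append_assoc, ih (['\\', c] ++ t), ih ['\\', c]]
      simp [pvUnescape_esc, pvUnescape]
  | chr b c _ hc ih =>
      intro t
      rw [List.append_assoc, ih ([c] ++ t), ih [c]]
      rw [List.singleton_append, pvUnescape_cons_ne c t hc, pvUnescape_cons_ne c [] hc]
      simp [pvUnescape]

theorem pvUnescape_ne_nil (c : Char) (cs : List Char) : pvUnescape (c :: cs) ≠ [] := by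
  by_cases hc : c = '\\'
  · subst hc
    cases cs with
    | nil => simp [pvUnescape]
    | cons c2 t => rw [pvUnescape_esc]; split <;> simp
  · rw [pvUnescape_cons_ne _ _ hc]; simp

theorem pvPass1_ne_nil (cs buf : List Char) (d : Int) : pvPass1 cs buf d ≠ [] := by
  fun_induction pvPass1 cs buf d <;> simp_all

theorem pv_main (n : Nat) : ∀ cs : List Char, cs.length ≤ n → ∀ (opts : List String) (buf : List Char) (d : Int),
    pvClosed buf →
    split_options_loop cs opts (pvUnescape buf) d = pvAssemble (pvPass1 cs buf d) opts := by
  induction n with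
  | zero =>
      intro cs hcs opts buf d hb
      have : cs = [] := List.eq_nil_of_length_eq_zero (Nat.le_zero.mp hcs)
      subst this
      simp only [split_options_loop, pvPass1, pvAssemble]
      by_cases hbuf : buf = []
      · subst hbuf; simp [pvUnescape]
      · obtain ⟨c, cs', rfl⟩ := List.exists_cons_of_ne_nil hbuf
        simp [pvUnescape_ne_nil]
  | succ n ih =>
      intro cs hcs opts buf d hb
      cases cs with
      | nil =>
          simp only [split_options_loop, pvPass1, pvAssemble]
          by_cases hbuf : buf = []
          · subst hbuf; simp [pvUnescape]
          · obtain ⟨c, cs', rfl⟩ := List.exists_cons_of_ne_nil hbuf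
            simp [pvUnescape_ne_nil]
      | cons c cs' =>
        have hlen : cs'.length ≤ n := by simp at hcs; omega
        by_cases hc : c = '\\'
        · subst hc
          cases cs' with
          | nil =>
              have hA : split_options_loop ['\\'] opts (pvUnescape buf) d
                  = split_options_loop [] opts (pvUnescape buf ++ ['\\']) d := rfl
              have hB : pvPass1 ['\\'] buf d = [buf ++ ['\\']] := rfl
              have h1 := pvUnescape_append_closed buf hb ['\\']
              simp only [pvUnescape] at h1
              rw [hA, hB]
              simp [split_options_loop, pvAssemble, h1]
          | cons c2 cs'' =>
              have hlen2 : cs''.length ≤ n := by simp at hcs; omega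
              have hu := pvUnescape_append_closed buf hb ['\\', c2]
              rw [pvUnescape_esc c2 []] at hu
              simp only [pvUnescape, List.append_nil] at hu
              simp only [split_options_loop, pvPass1]
              by_cases h2 : c2 = ',' ∨ c2 = '{' ∨ c2 = '}'
              · rw [if_pos h2]
                rw [if_pos h2] at hu
                rw [← hu]
                exact ih cs'' hlen2 opts (buf ++ ['\\', c2]) d (pvClosed.esc buf c2 hb)
              · rw [if_neg h2]
                rw [if_neg h2] at hu
                rw [← hu]
                exact ih cs'' hlen2 opts (buf ++ ['\\', c2]) d (pvClosed.esc buf c2 hb)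
        · have hu := pvUnescape_append_closed buf hb [c]
          rw [pvUnescape_cons_ne c [] hc] at hu
          simp only [pvUnescape] at hu
          by_cases h1 : c = '{'
          · subst h1
            simp only [split_options_loop, pvPass1]
            rw [← hu]
            exact ih cs' hlen opts (buf ++ ['{']) (d+1) (pvClosed.chr buf _ hb hc)
          · by_cases h2 : c = '}'
            · subst h2
              simp only [split_options_loop, pvPass1]
              rw [← hu]
              exact ih cs' hlen opts (buf ++ ['}']) (d-1) (pvClosed.chr buf _ hb hc)
            · by_cases h3 : c = ','
              · subst h3
                simp only [split_options_loop, pvPass1]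
                by_cases hd : d = 0
                · rw [if_pos hd, if_pos hd]
                  obtain ⟨s, r, hsr⟩ : ∃ s r, pvPass1 cs' [] d = s :: r := by
                    cases h : pvPass1 cs' [] d with
                    | nil => exact absurd h (pvPass1_ne_nil cs' [] d)
                    | cons s r => exact ⟨s, r, rfl⟩
                  rw [hsr]
                  simp only [pvAssemble]
                  have := ih cs' hlen
                    (if String.ofList (PySem.Chars.strip (pvUnescape buf)) ≠ "" ∨ opts = []
                      then opts ++ [String.ofList (PySem.Chars.strip (pvUnescape buf))] else opts)
                    [] d pvClosed.nil
                  simp only [pvUnescape] at this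
                  rw [this, hsr]
                · rw [if_neg hd, if_neg hd]
                  rw [← hu]
                  exact ih cs' hlen opts (buf ++ [',']) d (pvClosed.chr buf _ hb hc)
              · have hA : split_options_loop (c :: cs') opts (pvUnescape buf) d
                    = split_options_loop cs' opts (pvUnescape buf ++ [c]) d := by
                  simp [split_options_loop, hc]
                have hB : pvPass1 (c :: cs') buf d = pvPass1 cs' (buf ++ [c]) d := by
                  simp [pvPass1, hc]
                rw [hA, hB, ← hu]
                exact ih cs' hlen opts (buf ++ [c]) d (pvClosed.chr buf _ hb hc)

-- ===== VERDICT (by name: the statement is the Claim_ definition above) =====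
theorem split_options_spec : Claim_equal_split_options := by
  intro text _
  unfold Spec_split_options split_options split_options_alt
  have := pv_main text.toList.length text.toList le_rfl [] [] 0 pvClosed.nil
  simpa [pvUnescape] using this
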